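-- pv_equiv track=rewrite | github.com/preetmodh/COMPETETIVE_CODING_QUESTIONS | GOOGLE COMPETETIONS/kickstart_A_2_2021.py | count
-- ===== SOURCE A (Python) =====
-- def count(i,j,p):
--     ci=i.index(p)
--     ri=j.index(p)
--     cup=ci + 1
--     cdown=len(i) - ci
--     rright=len(j) - ri
--     rleft=ri + 1
--
--     cnt=0
--     if cup>1 and rright>1:
--         for i in range(2,min(cup,rright)+1):
--             if 2*i<=max(cup,rright):
--                 cnt+=1
--             else:
--                 break
--         for i in range(2,max(cup,rright)+1):
--             if 2*i<=min(cup,rright):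
--                 cnt+=1
--             else:
--                 break
--
--     if cup>1 and rleft>1:
--         for i in range(2,min(cup,rleft)+1):
--             if 2*i<=max(cup,rleft):
--                 cnt+=1
--             else:
--                 break
--         for i in range(2,max(cup,rleft)+1):
--             if 2*i<=min(cup,rleft):
--                 cnt+=1
--             else:
--                 break
--     if cdown>1 and rright>1:
--         for i in range(2,min(cdown,rright)+1):
--             if 2*i<=max(cdown,rright):
--                 cnt+=1
--             else:
--                 break
--         for i in range(2,max(cdown,rright)+1):
--             if 2*i<=min(cdown,rright):
--                 cnt+=1
--             else:
--                 break
--     if cdown>1 and rleft>1: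
--         for i in range(2,min(cdown,rleft)+1):
--             if 2*i<=max(cdown,rleft):
--                 cnt+=1
--             else:
--                 break
--         for i in range(2,max(cdown,rleft)+1):
--             if 2*i<=min(cdown,rleft):
--                 cnt+=1
--             else:
--                 break
--     return cnt
-- ===== SOURCE B (Python) =====
-- def count(i, j, p):
--     ci = i.index(p)
--     ri = j.index(p)
--     cup, cdown = ci + 1, len(i) - ci
--     rleft, rright = ri + 1, len(j) - ri
--
--     def add(a, b):
--         if a > 1 and b > 1:
--             lo, hi = min(a, b), max(a, b)
--             return max(0, min(lo, hi // 2) - 1) + max(0, lo // 2 - 1)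
--         return 0
--
--     return add(cup, rright) + add(cup, rleft) + add(cdown, rright) + add(cdown, rleft)
-- ===== Notes on version B (the rewrite author's own statement) =====
-- stated objective: simpler
-- what changed: Replaces the four pairs of break-terminated counting loops with a closed-form count per (a,b) pair (max(0,min(a,b,max(a,b)//2)-1)+max(0,min(a,b)//2-1)), factored into one helper applied to the four quadrant pairs; Pre_ excludes inputs where p is absent from i or j, on which both A and B raise ValueError.
import Mathlib
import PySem

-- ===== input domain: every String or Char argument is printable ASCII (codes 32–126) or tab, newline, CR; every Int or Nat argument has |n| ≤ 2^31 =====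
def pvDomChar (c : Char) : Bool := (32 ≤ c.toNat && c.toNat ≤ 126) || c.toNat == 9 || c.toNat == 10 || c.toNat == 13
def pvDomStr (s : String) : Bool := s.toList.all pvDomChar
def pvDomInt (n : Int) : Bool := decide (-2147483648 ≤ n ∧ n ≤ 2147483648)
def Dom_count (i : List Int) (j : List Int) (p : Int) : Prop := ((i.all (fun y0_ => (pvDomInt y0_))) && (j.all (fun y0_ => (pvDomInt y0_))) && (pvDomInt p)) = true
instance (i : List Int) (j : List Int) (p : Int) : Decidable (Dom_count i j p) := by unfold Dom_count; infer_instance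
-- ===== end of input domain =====

-- B replaces A's four pairs of break-terminated counting loops with a closed-form
-- count per quadrant pair, factored into one helper (objective: simpler).

-- ===== PORT A =====
-- break-terminated 'for i in range(...): if 2*i<=m: cnt+=1 else: break'
def brkLoop (m : Int) : List Int → Int → Int
  | [], cnt => cnt
  | x :: xs, cnt => if 2 * x ≤ m then brkLoop m xs (cnt + 1) else cnt

def count (i : List Int) (j : List Int) (p : Int) : Int :=
  match PySem.List.index? i p, PySem.List.index? j p with
  | some ci, some ri =>
    let cup : Int := (ci : Int) + 1
    let cdown : Int := PySem.List.len i - (ci : Int)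
    let rright : Int := PySem.List.len j - (ri : Int)
    let rleft : Int := (ri : Int) + 1
    let cnt : Int := 0
    let cnt := if cup > 1 ∧ rright > 1 then
        brkLoop (min cup rright)
          (PySem.List.pyRange 2 (max cup rright + 1) 1)
          (brkLoop (max cup rright) (PySem.List.pyRange 2 (min cup rright + 1) 1) cnt)
      else cnt
    let cnt := if cup > 1 ∧ rleft > 1 then
        brkLoop (min cup rleft)
          (PySem.List.pyRange 2 (max cup rleft + 1) 1)
          (brkLoop (max cup rleft) (PySem.List.pyRange 2 (min cup rleft + 1) 1) cnt)
      else cnt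
    let cnt := if cdown > 1 ∧ rright > 1 then
        brkLoop (min cdown rright)
          (PySem.List.pyRange 2 (max cdown rright + 1) 1)
          (brkLoop (max cdown rright) (PySem.List.pyRange 2 (min cdown rright + 1) 1) cnt)
      else cnt
    let cnt := if cdown > 1 ∧ rleft > 1 then
        brkLoop (min cdown rleft)
          (PySem.List.pyRange 2 (max cdown rleft + 1) 1)
          (brkLoop (max cdown rleft) (PySem.List.pyRange 2 (min cdown rleft + 1) 1) cnt)
      else cnt
    cnt
  | _, _ => 0  -- unreachable under Pre_count (Python raises ValueError)

-- ===== PORT B =====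
def addPair (a b : Int) : Int :=
  if a > 1 ∧ b > 1 then
    let lo := min a b
    let hi := max a b
    max 0 (min lo (PySem.Int.floordiv hi 2) - 1) + max 0 (PySem.Int.floordiv lo 2 - 1)
  else 0

def count_alt (i : List Int) (j : List Int) (p : Int) : Int :=
  match PySem.List.index? i p with
  | none => 0  -- unreachable under Pre_count (Python raises ValueError)
  | some ci =>
    match PySem.List.index? j p with
    | none => 0  -- unreachable under Pre_count (Python raises ValueError)
    | some ri =>
      let cup : Int := (ci : Int) + 1
      let cdown : Int := PySem.List.len i - (ci : Int)
      let rright : Int := PySem.List.len j - (ri : Int)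
      let rleft : Int := (ri : Int) + 1
      addPair cup rright + addPair cup rleft + addPair cdown rright + addPair cdown rleft

-- ===== PRECONDITION & SPEC =====
-- Pre_ excludes exactly the inputs where list.index raises ValueError (p missing from i or j).
def Pre_count (i : List Int) (j : List Int) (p : Int) : Prop := p ∈ i ∧ p ∈ j
instance (i : List Int) (j : List Int) (p : Int) : Decidable (Pre_count i j p) := by unfold Pre_count; infer_instance
def pvWitness_count : List Int × List Int × Int := ([1, 5, 2, 5], [5, 3, 3], 5)

def Spec_count (i : List Int) (j : List Int) (p : Int) (out : Int) : Prop := out = count_alt i j p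
instance (i : List Int) (j : List Int) (p : Int) (out : Int) : Decidable (Spec_count i j p out) := by unfold Spec_count; infer_instance

-- ===== CLAIM (what is proved, stated in full; the proofs are below) =====
def Claim_equal_count : Prop := ∀ (i : List Int) (j : List Int) (p : Int), Dom_count i j p → Pre_count i j p → Spec_count i j p (count i j p)

-- ===== LEMMAS AND PROOFS =====

-- the break loop over range(a,b) counts the leading i with 2*i ≤ m: a closed form
theorem brkLoop_pyRange (m : Int) : ∀ (n : Nat) (a b c : Int), (b - a).toNat = n →
    brkLoop m (PySem.List.pyRange a b 1) c = c + max 0 (min b (PySem.Int.floordiv m 2 + 1) - a) := by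
  intro n
  induction n with
  | zero =>
    intro a b c hn
    have hab : b ≤ a := by omega
    rw [PySem.List.pyRange_one_eq_nil hab]
    have hfd : PySem.Int.floordiv m 2 = m / 2 :=
      PySem.Int.floordiv_eq_ediv_of_pos (by omega : (0:Int) < 2)
    simp [brkLoop]; omega
  | succ k ih =>
    intro a b c hn
    have hfd : PySem.Int.floordiv m 2 = m / 2 :=
      PySem.Int.floordiv_eq_ediv_of_pos (by omega : (0:Int) < 2)
    have hab : a < b := by omega
    rw [PySem.List.pyRange_one_cons hab]
    by_cases hm : 2 * a ≤ m
    · simp only [brkLoop, if_pos hm]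
      rw [ih (a+1) b (c+1) (by omega), hfd]
      omega
    · simp only [brkLoop, if_neg hm]
      rw [hfd]
      omega

theorem block_eq (a b c : Int) :
    (if a > 1 ∧ b > 1 then
        brkLoop (min a b)
          (PySem.List.pyRange 2 (max a b + 1) 1)
          (brkLoop (max a b) (PySem.List.pyRange 2 (min a b + 1) 1) c)
      else c) = c + addPair a b := by
  unfold addPair
  dsimp only
  split_ifs with h
  · rw [brkLoop_pyRange (max a b) _ 2 (min a b + 1) c rfl,
        brkLoop_pyRange (min a b) _ 2 (max a b + 1) _ rfl]
    rw [PySem.Int.floordiv_eq_ediv_of_pos (by omega : (0:Int) < 2),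
        PySem.Int.floordiv_eq_ediv_of_pos (by omega : (0:Int) < 2)]
    omega
  · omega

-- ===== VERDICT (by name: the statement is the Claim_ definition above) =====
theorem count_spec : Claim_equal_count := by
  intro i j p _ hpre
  obtain ⟨hi, hj⟩ := hpre
  have hi' : (PySem.List.index? i p).isSome := (PySem.List.index?_isSome_iff i p).mpr hi
  have hj' : (PySem.List.index? j p).isSome := (PySem.List.index?_isSome_iff j p).mpr hj
  obtain ⟨ci, hci⟩ := Option.isSome_iff_exists.mp hi'
  obtain ⟨ri, hri⟩ := Option.isSome_iff_exists.mp hj'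
  unfold Spec_count count count_alt
  rw [hci, hri]
  simp only [block_eq]
  ring
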